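-- pv_equiv track=rewrite | github.com/murilocapozzi/leetcode | daily/624/Solution.py | maxDistance
-- ===== SOURCE A (Python) =====
-- def maxDistance(arrays: list[list[int]]) -> int:
--
--     maxDist = 0
--     minGlobal = arrays[0][0]
--     maxGlobal = arrays[0][-1]
--
--     for i in range(1, len(arrays)):
--
--         maxDist = max(maxDist, abs(maxGlobal - arrays[i][0]), abs(arrays[i][-1] - minGlobal))
--
--         minGlobal = min(minGlobal, arrays[i][0])
--
--         maxGlobal = max(maxGlobal, arrays[i][-1])
--
--
--     return maxDist
-- ===== SOURCE B (Python) =====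
-- def maxDistance(arrays):
--     firsts = [a[0] for a in arrays]
--     lasts = [a[-1] for a in arrays]
--     pmax = []
--     for y in lasts:
--         pmax.append(y if not pmax else max(pmax[-1], y))
--     pmin = []
--     for x in firsts:
--         pmin.append(x if not pmin else min(pmin[-1], x))
--     cands = [0]
--     cands += [abs(hi - f) for hi, f in zip(pmax, firsts[1:])]
--     cands += [abs(l - lo) for lo, l in zip(pmin, lasts[1:])]
--     return max(cands)
-- ===== Notes on version B (the rewrite author's own statement) =====
-- stated objective: alternative
-- what changed: B replaces A's single streaming pass carrying (maxDist, minGlobal, maxGlobal) by first materialising the prefix-max-of-last-elements and prefix-min-of-first-elements lists and then taking the max of a candidate list built by zipping them against the remaining endpoints.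
import Mathlib
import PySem

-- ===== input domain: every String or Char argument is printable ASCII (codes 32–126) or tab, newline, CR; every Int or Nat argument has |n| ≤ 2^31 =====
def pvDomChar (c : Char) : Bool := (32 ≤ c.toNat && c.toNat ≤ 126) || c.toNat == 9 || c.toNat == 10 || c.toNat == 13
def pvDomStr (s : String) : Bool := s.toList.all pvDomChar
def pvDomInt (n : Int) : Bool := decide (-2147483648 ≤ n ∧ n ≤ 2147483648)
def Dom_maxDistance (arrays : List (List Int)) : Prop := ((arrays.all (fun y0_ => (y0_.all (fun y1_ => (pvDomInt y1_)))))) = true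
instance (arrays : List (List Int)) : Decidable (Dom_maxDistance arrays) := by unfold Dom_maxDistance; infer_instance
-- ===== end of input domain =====

-- B is an equally costly but differently decomposed implementation: two prefix-extrema
-- lists are built first, then the answer is the max of one candidate list (objective: alternative).

-- ===== PORT A =====
-- a[0] and a[-1] (Pre_ guarantees the inner lists are nonempty, so the default is never used)
def fstD (a : List Int) : Int := a.headD 0
def lstD (a : List Int) : Int := a.getLastD 0

-- one loop step of A: state (maxDist, minGlobal, maxGlobal), visiting arrays[i]
def stepA (s : Int × Int × Int) (a : List Int) : Int × Int × Int :=
  (max s.1 (max |s.2.2 - fstD a| |lstD a - s.2.1|),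
   min s.2.1 (fstD a),
   max s.2.2 (lstD a))

def maxDistance (arrays : List (List Int)) : Int :=
  -- arrays[0][0] / arrays[0][-1]; Pre_ guarantees the lists are nonempty, so headD/getLastD are exact
  let minGlobal := fstD (arrays.headD [])
  let maxGlobal := lstD (arrays.headD [])
  -- for i in range(1, len(arrays)) reading arrays[i] = fold over arrays.drop 1
  ((arrays.drop 1).foldl stepA (0, minGlobal, maxGlobal)).1

-- ===== PORT B =====
-- running-extremum prefix list: prefWith f a [x1,x2,…] = [a, f a x1, f (f a x1) x2, …]
def prefWith (f : Int → Int → Int) (a : Int) : List Int → List Int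
  | [] => [a]
  | x :: xs => a :: prefWith f (f a x) xs

def maxDistance_alt (arrays : List (List Int)) : Int :=
  let firsts := arrays.map fstD
  let lasts := arrays.map lstD
  let pmax := match lasts with | [] => ([] : List Int) | y :: ys => prefWith max y ys
  let pmin := match firsts with | [] => ([] : List Int) | x :: xs => prefWith min x xs
  let cands := 0 ::
    (((pmax.zip (firsts.drop 1)).map (fun p => |p.1 - p.2|)) ++
     ((pmin.zip (lasts.drop 1)).map (fun p => |p.2 - p.1|)))
  match cands with
  | [] => 0
  | c :: cs => cs.foldl max c

-- ===== PRECONDITION & SPEC =====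
-- Pre_: exactly where Python A returns (it raises IndexError on an empty outer list or any empty inner list)
def Pre_maxDistance (arrays : List (List Int)) : Prop :=
  arrays ≠ [] ∧ ∀ a ∈ arrays, a ≠ []
instance (arrays : List (List Int)) : Decidable (Pre_maxDistance arrays) := by
  unfold Pre_maxDistance; infer_instance
def pvWitness_maxDistance : List (List Int) := [[1, 4], [2, 3]]

def Spec_maxDistance (arrays : List (List Int)) (out : Int) : Prop := out = maxDistance_alt arrays
instance (arrays : List (List Int)) (out : Int) : Decidable (Spec_maxDistance arrays out) := by unfold Spec_maxDistance; infer_instance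

-- ===== CLAIM (what is proved, stated in full; the proofs are below) =====
def Claim_equal_maxDistance : Prop := ∀ (arrays : List (List Int)), Dom_maxDistance arrays → Pre_maxDistance arrays → Spec_maxDistance arrays (maxDistance arrays)

-- ===== LEMMAS AND PROOFS =====

-- the list of A's candidate terms, in A's visiting order, from state (mn, mx)
def go (mn mx : Int) : List (List Int) → List Int
  | [] => []
  | a :: t => |mx - fstD a| :: |lstD a - mn| :: go (min mn (fstD a)) (max mx (lstD a)) t

-- the first-kind terms only (prefix-max of lasts against firsts)
def goF (mx : Int) : List (List Int) → List Int
  | [] => []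
  | a :: t => |mx - fstD a| :: goF (max mx (lstD a)) t

-- the second-kind terms only (lasts against prefix-min of firsts)
def goL (mn : Int) : List (List Int) → List Int
  | [] => []
  | a :: t => |lstD a - mn| :: goL (min mn (fstD a)) t

theorem foldA_eq_go (t : List (List Int)) : ∀ d mn mx : Int,
    (t.foldl stepA (d, mn, mx)).1 = (go mn mx t).foldl max d := by
  induction t with
  | nil => intro d mn mx; simp [go]
  | cons a t ih =>
      intro d mn mx
      simp only [List.foldl, go, stepA]
      rw [ih]
      congr 1
      rw [max_assoc]

theorem zipF_eq_goF (t : List (List Int)) : ∀ mx : Int,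
    (((prefWith max mx (t.map lstD)).zip
        (t.map fstD)).map (fun p => |p.1 - p.2|)) = goF mx t := by
  induction t with
  | nil => intro mx; simp [prefWith, goF]
  | cons a t ih =>
      intro mx
      simp only [List.map_cons, prefWith, List.zip_cons_cons, List.map_cons, goF]
      exact congrArg _ (ih _)

theorem zipL_eq_goL (t : List (List Int)) : ∀ mn : Int,
    (((prefWith min mn (t.map fstD)).zip
        (t.map lstD)).map (fun p => |p.2 - p.1|)) = goL mn t := by
  induction t with
  | nil => intro mn; simp [prefWith, goL]
  | cons a t ih =>
      intro mn
      simp only [List.map_cons, prefWith, List.zip_cons_cons, List.map_cons, goL]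
      exact congrArg _ (ih _)

theorem go_perm (t : List (List Int)) : ∀ mn mx : Int,
    (go mn mx t).Perm (goF mx t ++ goL mn t) := by
  induction t with
  | nil => intro mn mx; simp [go, goF, goL]
  | cons a t ih =>
      intro mn mx
      simp only [go, goF, goL, List.cons_append]
      refine List.Perm.cons _ ?_
      exact ((ih _ _).cons _).trans (List.perm_middle.symm)

theorem foldl_max_perm {l₁ l₂ : List Int} (h : l₁.Perm l₂) (d : Int) :
    l₁.foldl max d = l₂.foldl max d := by
  exact h.foldl_eq d

-- ===== VERDICT (by name: the statement is the Claim_ definition above) =====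
theorem maxDistance_spec : Claim_equal_maxDistance := by
  intro arrays _ _
  unfold Spec_maxDistance maxDistance maxDistance_alt
  cases arrays with
  | nil => rfl
  | cons a t =>
      simp only [List.headD_cons, List.map_cons, List.drop_succ_cons, List.drop_zero]
      rw [foldA_eq_go, zipF_eq_goF, zipL_eq_goL]
      exact foldl_max_perm (go_perm t (fstD a) (lstD a)) 0
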